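-- pv_equiv track=rewrite | github.com/theElandor/Everybody-Codes | day10/p3.py | check
-- ===== SOURCE A (Python) =====
-- def check(grid, rs, cs):
-- 	for i in range(rs, rs+8):
-- 		for j in range(cs, cs+8):
-- 			if grid[i][j] == "?" or grid[i][j]== ".":
-- 				return False
-- 	for i in range(rs+2,rs+6):
-- 		for j in range(cs+2,cs+6):
-- 			current = grid[i][j]
-- 			if current != "*":
-- 				row_counter = 0
-- 				for jj in range(cs, cs+8):
-- 					c = grid[i][jj]
-- 					if c == current:
-- 						row_counter += 1
-- 				col_counter = 0
-- 				for ii in range(rs, rs+8):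
-- 					c = grid[ii][j]
-- 					if c == current:
-- 						col_counter += 1
-- 				if col_counter == 2 and row_counter == 2:
-- 					continue
-- 				else:
-- 					return False
-- 	return True
-- ===== SOURCE B (Python) =====
-- def check(grid, rs, cs):
--     # Reject any '?' or '.' cell first (same row-major scan as the spec demands).
--     for i in range(rs, rs + 8):
--         for j in range(cs, cs + 8):
--             if grid[i][j] in ("?", "."):
--                 return False
--     # Build frequency tables once: per-row and per-column character counts
--     # over the 8x8 block; then validate the inner 4x4 by table lookup.
--     row_count = {}
--     for i in range(rs, rs + 8):
--         counts = {}
--         for j in range(cs, cs + 8):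
--             c = grid[i][j]
--             counts[c] = counts.get(c, 0) + 1
--         row_count[i] = counts
--     col_count = {}
--     for j in range(cs, cs + 8):
--         counts = {}
--         for i in range(rs, rs + 8):
--             c = grid[i][j]
--             counts[c] = counts.get(c, 0) + 1
--         col_count[j] = counts
--     for i in range(rs + 2, rs + 6):
--         for j in range(cs + 2, cs + 6):
--             c = grid[i][j]
--             if c != "*" and not (row_count[i][c] == 2 and col_count[j][c] == 2):
--                 return False
--     return True
-- ===== Notes on version B (the rewrite author's own statement) =====
-- stated objective: alternative
-- what changed: A's per-cell row/column scanning loops (an 8-cell row scan and an 8-cell column scan for every inner cell) are removed: B builds per-row and per-column character-frequency tables once after the '?'/'.' scan and validates each inner 4x4 cell by two table lookups.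
import Mathlib
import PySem

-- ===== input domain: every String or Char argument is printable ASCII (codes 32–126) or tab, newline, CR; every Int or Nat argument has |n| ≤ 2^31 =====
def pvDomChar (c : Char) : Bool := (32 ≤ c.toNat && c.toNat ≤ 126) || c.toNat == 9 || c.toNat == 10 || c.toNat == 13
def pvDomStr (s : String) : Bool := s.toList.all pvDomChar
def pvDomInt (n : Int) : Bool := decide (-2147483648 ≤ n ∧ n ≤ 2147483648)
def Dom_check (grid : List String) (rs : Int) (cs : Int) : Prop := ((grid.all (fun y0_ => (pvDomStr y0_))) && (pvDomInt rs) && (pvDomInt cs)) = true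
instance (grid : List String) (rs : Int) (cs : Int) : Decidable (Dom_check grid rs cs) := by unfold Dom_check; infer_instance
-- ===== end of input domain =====

-- B replaces A's per-cell row/column scans by row/column frequency tables built
-- once, then validates each inner cell by table lookup (alternative decomposition).

-- grid[i][j], total under Pre_check (exact where both indices are in range, Python wrap rule)
def pvCell (grid : List String) (i j : Int) : Char :=
  PySem.List.pyGetD (PySem.List.pyGetD grid i "").toList j ' '

-- ===== PORT A =====
def check (grid : List String) (rs : Int) (cs : Int) : Bool :=
  -- first 8x8 pass: 'return False' on '?' or '.' ⇒ List.all
  if (PySem.List.pyRange rs (rs+8) 1).all (fun i =>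
       (PySem.List.pyRange cs (cs+8) 1).all (fun j =>
         !(pvCell grid i j == '?' || pvCell grid i j == '.'))) then
    -- inner 4x4 pass with per-cell row/column scanning loops
    (PySem.List.pyRange (rs+2) (rs+6) 1).all (fun i =>
      (PySem.List.pyRange (cs+2) (cs+6) 1).all (fun j =>
        let current := pvCell grid i j
        if current != '*' then
          let row_counter : Int := (PySem.List.pyRange cs (cs+8) 1).foldl
            (fun acc jj => if pvCell grid i jj == current then acc + 1 else acc) 0
          let col_counter : Int := (PySem.List.pyRange rs (rs+8) 1).foldl
            (fun acc ii => if pvCell grid ii j == current then acc + 1 else acc) 0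
          col_counter == 2 && row_counter == 2
        else true))
  else false

-- ===== PORT B =====
def check_alt (grid : List String) (rs : Int) (cs : Int) : Bool :=
  -- first 8x8 pass: 'return False' on '?' or '.' ⇒ List.all
  if (PySem.List.pyRange rs (rs+8) 1).all (fun i =>
       (PySem.List.pyRange cs (cs+8) 1).all (fun j =>
         !(pvCell grid i j == '?' || pvCell grid i j == '.'))) then
    -- frequency tables, built once
    let row_count : PySem.Dict Int (PySem.Dict Char Int) :=
      (PySem.List.pyRange rs (rs+8) 1).foldl (fun d i =>
        d.insert i ((PySem.List.pyRange cs (cs+8) 1).foldl (fun cnt j =>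
          cnt.insert (pvCell grid i j) (cnt.getD (pvCell grid i j) 0 + 1)) PySem.Dict.empty))
        PySem.Dict.empty
    let col_count : PySem.Dict Int (PySem.Dict Char Int) :=
      (PySem.List.pyRange cs (cs+8) 1).foldl (fun d j =>
        d.insert j ((PySem.List.pyRange rs (rs+8) 1).foldl (fun cnt i =>
          cnt.insert (pvCell grid i j) (cnt.getD (pvCell grid i j) 0 + 1)) PySem.Dict.empty))
        PySem.Dict.empty
    -- inner 4x4 pass by table lookup
    (PySem.List.pyRange (rs+2) (rs+6) 1).all (fun i =>
      (PySem.List.pyRange (cs+2) (cs+6) 1).all (fun j =>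
        let c := pvCell grid i j
        !(c != '*' &&
          !((row_count.getD i PySem.Dict.empty).getD c 0 == 2 &&
            (col_count.getD j PySem.Dict.empty).getD c 0 == 2))))
  else false

-- ===== PRECONDITION & SPEC =====
-- the 8x8 block cells in the row-major order both programs scan them
def pvBlock (rs cs : Int) : List (Int × Int) :=
  (PySem.List.pyRange rs (rs+8) 1).flatMap (fun i =>
    (PySem.List.pyRange cs (cs+8) 1).map (fun j => (i, j)))

-- cell (i, j) exists (Python index rule, negative indices wrap)
def pvValid (grid : List String) (p : Int × Int) : Prop :=
  PySem.Raise.InRange grid.length p.1 ∧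
  PySem.Raise.InRange (PySem.List.pyGetD grid p.1 "").toList.length p.2

-- cell (i, j) makes the first pass return False
def pvBad (grid : List String) (p : Int × Int) : Prop :=
  pvCell grid p.1 p.2 = '?' ∨ pvCell grid p.1 p.2 = '.'

-- Pre_check is exactly A's domain: a block cell may be out of range (IndexError)
-- only if an in-range '?'/'.' cell precedes it in row-major scan order (then both
-- programs return False before reaching it).
def Pre_check (grid : List String) (rs : Int) (cs : Int) : Prop :=
  ∀ k : Nat, k < (pvBlock rs cs).length →
    ¬ pvValid grid ((pvBlock rs cs).getD k (0, 0)) →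
    ∃ m : Nat, m < k ∧ pvValid grid ((pvBlock rs cs).getD m (0, 0)) ∧
      pvBad grid ((pvBlock rs cs).getD m (0, 0))
instance (grid : List String) (rs : Int) (cs : Int) : Decidable (Pre_check grid rs cs) := by
  unfold Pre_check pvValid pvBad; infer_instance

def pvWitness_check : List String × Int × Int :=
  (["ABCDEFGH", "BADCFEHG", "CDAB**GH", "DCBA**HG",
    "EFGH**AB", "FEHG**BA", "GHABCDEF", "HGBADCFE"], 0, 0)

def Spec_check (grid : List String) (rs : Int) (cs : Int) (out : Bool) : Prop := out = check_alt grid rs cs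
instance (grid : List String) (rs : Int) (cs : Int) (out : Bool) : Decidable (Spec_check grid rs cs out) := by unfold Spec_check; infer_instance

-- ===== CLAIM (what is proved, stated in full; the proofs are below) =====
def Claim_equal_check : Prop := ∀ (grid : List String) (rs : Int) (cs : Int), Dom_check grid rs cs → Pre_check grid rs cs → Spec_check grid rs cs (check grid rs cs)

-- ===== LEMMAS AND PROOFS =====

theorem pv_all_congr {α : Type} (l : List α) (f g : α → Bool)
    (h : ∀ x ∈ l, f x = g x) : l.all f = l.all g := by
  induction l with
  | nil => rfl
  | cons a t ih =>
    simp only [List.all_cons, h a List.mem_cons_self,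
      ih (fun x hx => h x (List.mem_cons_of_mem _ hx))]

-- counting fold (A's scan) = List.count of the scanned characters
theorem pv_foldl_count (l : List Int) (g : Int → Char) (c : Char) (acc : Int) :
    l.foldl (fun a x => if g x == c then a + 1 else a) acc
      = acc + ((l.map g).count c : Int) := by
  induction l generalizing acc with
  | nil => simp
  | cons h t ih =>
    simp only [List.foldl_cons, List.map_cons, ih]
    by_cases hc : g h == c
    · simp only [hc, if_pos, List.count_cons]
      push_cast
      ring
    · simp [List.count_cons, hc]

-- B's inner counting fold = PySem.Dict.counter of the scanned characters
theorem pv_counter_fold (l : List Int) (g : Int → Char) (c : Char) :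
    ((l.foldl (fun cnt x => cnt.insert (g x) (cnt.getD (g x) 0 + 1)) PySem.Dict.empty
        : PySem.Dict Char Int).getD c 0)
      = ((l.map g).count c : Int) := by
  have h : l.foldl (fun cnt x => cnt.insert (g x) (cnt.getD (g x) 0 + 1))
        (PySem.Dict.empty : PySem.Dict Char Int)
      = (l.map g).foldl (fun d x => d.insert x (d.getD x 0 + 1)) PySem.Dict.empty := by
    rw [List.foldl_map]
  rw [h, PySem.Dict.foldl_insert_getD_add_one_eq_counter, PySem.Dict.getD_counter]

-- inserts of keys a value is not among preserve the looked-up value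
theorem pv_getD_foldl_not_mem {ν : Type} (t : List Int) (f : Int → ν)
    (d : PySem.Dict Int ν) (dflt : ν) (i : Int) (hd : i ∉ t) :
    (t.foldl (fun d x => d.insert x (f x)) d).getD i dflt = d.getD i dflt := by
  induction t generalizing d with
  | nil => rfl
  | cons h' t' ih =>
    simp only [List.foldl_cons]
    rw [ih _ (fun hh => hd (List.mem_cons_of_mem _ hh)), PySem.Dict.getD_insert,
      if_neg (by intro hh; subst hh; exact hd List.mem_cons_self)]

-- lookup in a table built by inserting each key of a Nodup list once
theorem pv_getD_table {ν : Type} (l : List Int) (f : Int → ν) (d0 : PySem.Dict Int ν)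
    (dflt : ν) (i : Int) (hnd : l.Nodup) (hi : i ∈ l) :
    (l.foldl (fun d x => d.insert x (f x)) d0).getD i dflt = f i := by
  induction l generalizing d0 with
  | nil => cases hi
  | cons h t ih =>
    simp only [List.foldl_cons]
    rcases List.mem_cons.mp hi with rfl | hit
    · rw [pv_getD_foldl_not_mem _ _ _ _ _ (List.nodup_cons.mp hnd).1,
        PySem.Dict.getD_insert, if_pos rfl]
    · exact ih _ (List.nodup_cons.mp hnd).2 hit

theorem pv_body_eq (grid : List String) (rs cs i j : Int)
    (hi : i ∈ PySem.List.pyRange (rs+2) (rs+6) 1)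
    (hj : j ∈ PySem.List.pyRange (cs+2) (cs+6) 1) :
    (if pvCell grid i j != '*' then
       ((PySem.List.pyRange rs (rs+8) 1).foldl
           (fun acc ii => if pvCell grid ii j == pvCell grid i j then acc + 1 else acc) (0:Int) == 2)
       && ((PySem.List.pyRange cs (cs+8) 1).foldl
           (fun acc jj => if pvCell grid i jj == pvCell grid i j then acc + 1 else acc) (0:Int) == 2)
     else true)
    = !(pvCell grid i j != '*' &&
         !((((PySem.List.pyRange rs (rs+8) 1).foldl (fun d i =>
              d.insert i ((PySem.List.pyRange cs (cs+8) 1).foldl (fun cnt j =>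
                cnt.insert (pvCell grid i j) (cnt.getD (pvCell grid i j) 0 + 1))
                (PySem.Dict.empty : PySem.Dict Char Int)))
              (PySem.Dict.empty : PySem.Dict Int (PySem.Dict Char Int))).getD i
                PySem.Dict.empty).getD (pvCell grid i j) 0 == (2:Int) &&
           (((PySem.List.pyRange cs (cs+8) 1).foldl (fun d j =>
              d.insert j ((PySem.List.pyRange rs (rs+8) 1).foldl (fun cnt i =>
                cnt.insert (pvCell grid i j) (cnt.getD (pvCell grid i j) 0 + 1))
                (PySem.Dict.empty : PySem.Dict Char Int)))
              (PySem.Dict.empty : PySem.Dict Int (PySem.Dict Char Int))).getD j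
                PySem.Dict.empty).getD (pvCell grid i j) 0 == (2:Int))) := by
  have hi' : i ∈ PySem.List.pyRange rs (rs+8) 1 := by
    rw [PySem.List.mem_pyRange_one] at hi ⊢; omega
  have hj' : j ∈ PySem.List.pyRange cs (cs+8) 1 := by
    rw [PySem.List.mem_pyRange_one] at hj ⊢; omega
  rw [pv_getD_table _ _ _ _ _ (PySem.List.nodup_pyRange_one _ _) hi',
      pv_getD_table _ _ _ _ _ (PySem.List.nodup_pyRange_one _ _) hj']
  rw [pv_counter_fold (PySem.List.pyRange cs (cs+8) 1) (fun jj => pvCell grid i jj) (pvCell grid i j),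
      pv_counter_fold (PySem.List.pyRange rs (rs+8) 1) (fun ii => pvCell grid ii j) (pvCell grid i j)]
  simp only [pv_foldl_count, zero_add]
  by_cases h : pvCell grid i j != '*'
  · simp only [h, if_true, Bool.true_and, Bool.not_not]
    exact Bool.and_comm _ _
  · simp [h]

-- ===== VERDICT (by name: the statement is the Claim_ definition above) =====
theorem check_spec : Claim_equal_check := by
  intro grid rs cs _ _
  unfold Spec_check check check_alt
  split
  · apply pv_all_congr
    intro i hi
    apply pv_all_congr
    intro j hj
    exact pv_body_eq grid rs cs i j hi hj
  · rfl
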